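-- pv_equiv track=rewrite | github.com/rise-hash/matrix-mod-inverse | solve.py | calculateD
-- ===== SOURCE A (Python) =====
-- def calculateD(a):
--     leng = len(a)
--     if (leng == 2):
--         return a[0][0] * a[1][1] - a[0][1] * a[1][0]
--     if (leng == 1):
--         return a[0][0]
--     if (leng == 0):
--         return None
--     add, sub = 0, 0
--     # 加法
--     for i in range(0, leng):
--         y, x, temp = i, 0, 1
--         for j in range(0, leng):
--             temp *= a[x][y]
--             x += 1
--             x = x % leng
--             y += 1
--             y = y % leng
--         add += temp
--     # 减法
--     for i in range(leng - 1, -1, -1):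
--         y, x, temp = i, 0, 1
--         for j in range(0, leng):
--             temp *= a[x][y]
--             x -= 1
--             x = x % leng
--             y += 1
--             y = y % leng
--         sub -= temp
--     return (sub + add) % 26
-- ===== SOURCE B (Python) =====
-- def calculateD(a):
--     n = len(a)
--     if n == 2:
--         return a[0][0] * a[1][1] - a[0][1] * a[1][0]
--     if n == 1:
--         return a[0][0]
--     if n == 0:
--         return None
--     # One scan over the step index s, maintaining n partial products per diagonal.
--     add_prod = [1] * n
--     sub_prod = [1] * n
--     for s in range(n):
--         row = a[s]
--         neg_row = a[(-s) % n]
--         add_prod = [p * row[(i + s) % n] for i, p in enumerate(add_prod)]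
--         sub_prod = [p * neg_row[(i + s) % n] for i, p in enumerate(sub_prod)]
--     return (sum(add_prod) - sum(sub_prod)) % 26
-- ===== Notes on version B (the rewrite author's own statement) =====
-- stated objective: alternative
-- what changed: For n>=3 the per-diagonal double loop (recomputing each diagonal product with its own wrap-around cursor walk, add pass then sub pass) is replaced by a single scan over the step index that maintains two length-n arrays of per-diagonal partial products, combined by sums at the end; the n<=2 branches are kept verbatim.
-- outside the precondition, e.g. on calculateD([[1, 2], [3]]): A raises IndexError, B raises IndexError
import Mathlib
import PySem

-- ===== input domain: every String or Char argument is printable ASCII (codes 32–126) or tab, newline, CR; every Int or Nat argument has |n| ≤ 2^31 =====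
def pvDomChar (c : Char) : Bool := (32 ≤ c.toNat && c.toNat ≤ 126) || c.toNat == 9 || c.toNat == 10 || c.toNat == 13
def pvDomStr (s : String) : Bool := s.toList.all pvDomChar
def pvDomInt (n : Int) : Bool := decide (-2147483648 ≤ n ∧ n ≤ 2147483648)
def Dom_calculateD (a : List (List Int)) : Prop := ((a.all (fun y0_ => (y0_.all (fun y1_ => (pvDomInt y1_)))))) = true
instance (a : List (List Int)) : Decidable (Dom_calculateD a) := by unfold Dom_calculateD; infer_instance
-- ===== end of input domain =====

-- B transposes A's per-diagonal loop nest into a single row scan maintaining two arrays of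
-- per-diagonal partial products (objective: alternative decomposition, same cost).

-- shared indexing helper: a[x][y] with Python list-index semantics; the defaults never fire
-- under Pre_calculateD (Python raises IndexError exactly on the inputs Pre_ excludes)
def pvAt (a : List (List Int)) (x y : Int) : Int :=
  PySem.List.pyGetD (PySem.List.pyGetD a x []) y 0

-- ===== PORT A =====
def calculateD (a : List (List Int)) : Option Int :=
  let leng : Int := (a.length : Int)
  if leng = 2 then
    some (pvAt a 0 0 * pvAt a 1 1 - pvAt a 0 1 * pvAt a 1 0)
  else if leng = 1 then
    some (pvAt a 0 0)
  else if leng = 0 then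
    none
  else
    let add : Int := (PySem.List.pyRange 0 leng 1).foldl
      (fun add i =>
        let st := (PySem.List.pyRange 0 leng 1).foldl
          (fun (st : Int × Int × Int) _j =>
            let temp := st.2.2 * pvAt a st.2.1 st.1
            let x := PySem.Int.mod (st.2.1 + 1) leng
            let y := PySem.Int.mod (st.1 + 1) leng
            (y, x, temp)) (i, 0, 1)
        add + st.2.2) 0
    let sub : Int := (PySem.List.pyRange (leng - 1) (-1) (-1)).foldl
      (fun sub i =>
        let st := (PySem.List.pyRange 0 leng 1).foldl
          (fun (st : Int × Int × Int) _j =>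
            let temp := st.2.2 * pvAt a st.2.1 st.1
            let x := PySem.Int.mod (st.2.1 + -1) leng
            let y := PySem.Int.mod (st.1 + 1) leng
            (y, x, temp)) (i, 0, 1)
        sub - st.2.2) 0
    some (PySem.Int.mod (sub + add) 26)

-- ===== PORT B =====
def calculateD_alt (a : List (List Int)) : Option Int :=
  let n : Int := (a.length : Int)
  if n = 2 then
    some (pvAt a 0 0 * pvAt a 1 1 - pvAt a 0 1 * pvAt a 1 0)
  else if n = 1 then
    some (pvAt a 0 0)
  else if n = 0 then
    none
  else
    let final := (PySem.List.pyRange 0 n 1).foldl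
      (fun (st : List Int × List Int) s =>
        let row := PySem.List.pyGetD a s []
        let negRow := PySem.List.pyGetD a (PySem.Int.mod (-s) n) []
        let addProd := (PySem.List.enumerate st.1).map
          (fun ip => ip.2 * PySem.List.pyGetD row (PySem.Int.mod (ip.1 + s) n) 0)
        let subProd := (PySem.List.enumerate st.2).map
          (fun ip => ip.2 * PySem.List.pyGetD negRow (PySem.Int.mod (ip.1 + s) n) 0)
        (addProd, subProd))
      (List.replicate a.length 1, List.replicate a.length 1)
    some (PySem.Int.mod (final.1.sum - final.2.sum) 26)

-- ===== PRECONDITION & SPEC =====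
-- Pre_ excludes exactly the ragged matrices (some row shorter than len(a)) on which the
-- Python A raises IndexError; it admits every input on which A returns.
def Pre_calculateD (a : List (List Int)) : Prop :=
  ∀ row ∈ a, a.length ≤ row.length
instance (a : List (List Int)) : Decidable (Pre_calculateD a) := by
  unfold Pre_calculateD; infer_instance

def pvWitness_calculateD : List (List Int) := [[1, 2, 3], [4, 5, 6], [7, 8, 10]]

def Spec_calculateD (a : List (List Int)) (out : Option Int) : Prop := out = calculateD_alt a
instance (a : List (List Int)) (out : Option Int) : Decidable (Spec_calculateD a out) := by
  unfold Spec_calculateD; infer_instance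

-- ===== CLAIM (what is proved, stated in full; the proofs are below) =====
def Claim_equal_calculateD : Prop :=
  ∀ (a : List (List Int)), Dom_calculateD a → Pre_calculateD a →
    Spec_calculateD a (calculateD a)

-- ===== LEMMAS AND PROOFS =====

-- the product along one wrapped diagonal: direction d (+1 in A's add pass, -1 in its sub
-- pass), start column i, factors in the order A's inner loop multiplies them
def pvF (a : List (List Int)) (d i : Int) : Int :=
  (PySem.List.pyRange 0 (a.length : Int) 1).foldl
    (fun t s => t * pvAt a (PySem.Int.mod (d * s) (a.length : Int))
                           (PySem.Int.mod (i + s) (a.length : Int))) 1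

-- A's inner loop computes the wrapped-diagonal product (generic in the start column c)
theorem pvInnerA (a : List (List Int)) (d i : Int)
    (hn : 0 < (a.length : Int)) :
    ∀ (k : Nat) (c t : Int), 0 ≤ c → c + k = (a.length : Int) →
    ((PySem.List.pyRange c (a.length : Int) 1).foldl
      (fun (st : Int × Int × Int) _j =>
        let temp := st.2.2 * pvAt a st.2.1 st.1
        let x := PySem.Int.mod (st.2.1 + d) (a.length : Int)
        let y := PySem.Int.mod (st.1 + 1) (a.length : Int)
        (y, x, temp))
      (PySem.Int.mod (i + c) (a.length : Int),
       PySem.Int.mod (d * c) (a.length : Int), t)).2.2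
    = (PySem.List.pyRange c (a.length : Int) 1).foldl
        (fun t s => t * pvAt a (PySem.Int.mod (d * s) (a.length : Int))
                               (PySem.Int.mod (i + s) (a.length : Int))) t := by
  intro k
  induction k with
  | zero =>
    intro c t hc hck
    rw [PySem.List.pyRange_one_eq_nil (by omega)]
    rfl
  | succ k ih =>
    intro c t hc hck
    rw [PySem.List.pyRange_one_cons (by omega)]
    simp only [List.foldl_cons]
    have h1 : PySem.Int.mod (PySem.Int.mod (i + c) (a.length : Int) + 1) (a.length : Int)
        = PySem.Int.mod (i + (c + 1)) (a.length : Int) := by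
      rw [PySem.Int.mod_eq_emod_of_pos hn, PySem.Int.mod_eq_emod_of_pos hn,
          PySem.Int.mod_eq_emod_of_pos hn, Int.emod_add_emod]
      ring_nf
    have h2 : PySem.Int.mod (PySem.Int.mod (d * c) (a.length : Int) + d) (a.length : Int)
        = PySem.Int.mod (d * (c + 1)) (a.length : Int) := by
      rw [PySem.Int.mod_eq_emod_of_pos hn, PySem.Int.mod_eq_emod_of_pos hn,
          PySem.Int.mod_eq_emod_of_pos hn, Int.emod_add_emod]
      ring_nf
    rw [h1, h2]
    exact ih (c + 1) _ (by omega) (by omega)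

-- enumerate over a mapped list
theorem pvEnumMap {α β : Type} (f : α → β) :
    ∀ (l : List α) (s : Int),
    PySem.List.enumerate (l.map f) s
      = (PySem.List.enumerate l s).map (fun p => (p.1, f p.2)) := by
  intro l
  induction l with
  | nil => intro s; simp [PySem.List.enumerate_nil]
  | cons x xs ih => intro s; simp [PySem.List.enumerate_cons, ih]

-- enumerating a unit-step range pairs each element with itself
theorem pvEnumRange (b : Int) :
    ∀ (k : Nat) (c : Int), (b - c).toNat = k →
    PySem.List.enumerate (PySem.List.pyRange c b 1) c
      = (PySem.List.pyRange c b 1).map (fun i => (i, i)) := by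
  intro k
  induction k with
  | zero => intro c hc; rw [PySem.List.pyRange_one_eq_nil (by omega)]; rfl
  | succ k ih =>
    intro c hc
    rw [PySem.List.pyRange_one_cons (by omega)]
    rw [PySem.List.enumerate_cons, List.map_cons, ih (c + 1) (by omega)]

-- the length-m partial product of a diagonal, as B's arrays hold it after m scan steps
def pvG (a : List (List Int)) (d : Int) (m : Nat) (i : Int) : Int :=
  (PySem.List.pyRange 0 (m : Int) 1).foldl
    (fun t s => t * pvAt a (if d = 1 then s else PySem.Int.mod (-s) (a.length : Int))
                           (PySem.Int.mod (i + s) (a.length : Int))) 1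

theorem pvG_succ (a : List (List Int)) (d : Int) (m : Nat) (i : Int) :
    pvG a d (m + 1) i
      = pvG a d m i * pvAt a (if d = 1 then (m : Int) else PySem.Int.mod (-(m : Int)) (a.length : Int))
                             (PySem.Int.mod (i + (m : Int)) (a.length : Int)) := by
  unfold pvG
  rw [show ((m + 1 : Nat) : Int) = ((m : Int) + 1) by push_cast; ring]
  rw [PySem.List.pyRange_one_succ_right (by positivity)]
  rw [List.foldl_append]
  rfl

-- B's scan invariant: after m steps the two arrays hold the length-m partial products
theorem pvScanB (a : List (List Int)) :
    ∀ (m : Nat), m ≤ a.length →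
    (PySem.List.pyRange 0 (m : Int) 1).foldl
      (fun (st : List Int × List Int) s =>
        let row := PySem.List.pyGetD a s []
        let negRow := PySem.List.pyGetD a (PySem.Int.mod (-s) (a.length : Int)) []
        let addProd := (PySem.List.enumerate st.1).map
          (fun ip => ip.2 * PySem.List.pyGetD row (PySem.Int.mod (ip.1 + s) (a.length : Int)) 0)
        let subProd := (PySem.List.enumerate st.2).map
          (fun ip => ip.2 * PySem.List.pyGetD negRow (PySem.Int.mod (ip.1 + s) (a.length : Int)) 0)
        (addProd, subProd))
      (List.replicate a.length 1, List.replicate a.length 1)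
    = ((PySem.List.pyRange 0 (a.length : Int) 1).map (pvG a 1 m),
       (PySem.List.pyRange 0 (a.length : Int) 1).map (pvG a (-1) m)) := by
  intro m
  induction m with
  | zero =>
    intro _
    have hz : ((0 : Nat) : Int) = 0 := by norm_num
    rw [hz, PySem.List.pyRange_one_eq_nil (le_refl 0)]
    simp only [List.foldl_nil]
    have h1 : pvG a 1 0 = fun _ => (1 : Int) := by
      funext i; unfold pvG; rw [hz, PySem.List.pyRange_one_eq_nil (le_refl 0)]; rfl
    have h2 : pvG a (-1) 0 = fun _ => (1 : Int) := by
      funext i; unfold pvG; rw [hz, PySem.List.pyRange_one_eq_nil (le_refl 0)]; rfl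
    rw [h1, h2]
    simp [List.map_const', PySem.List.length_pyRange_one]
  | succ m ih =>
    intro hm
    rw [show ((m + 1 : Nat) : Int) = ((m : Int) + 1) by push_cast; ring]
    rw [PySem.List.pyRange_one_succ_right (by positivity), List.foldl_append,
        ih (by omega), List.foldl_cons, List.foldl_nil]
    simp only
    refine congrArg₂ Prod.mk ?_ ?_ <;>
    · rw [pvEnumMap, List.map_map,
          pvEnumRange (a.length : Int) a.length 0 (by simp)]
      rw [List.map_map]
      apply List.map_congr_left
      intro i _hi
      simp only [Function.comp]
      rw [pvG_succ]
      simp [pvAt]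

-- mapped negation pulls out of a list sum
theorem pvSumNeg (l : List Int) (f : Int → Int) :
    (l.map (fun i => -f i)).sum = -((l.map f).sum) := by
  induction l with
  | nil => simp
  | cons x xs ih => simp [ih]; ring

-- ===== VERDICT (by name: the statement is the Claim_ definition above) =====
theorem calculateD_spec : Claim_equal_calculateD := by
  unfold Claim_equal_calculateD
  intro a _dom _pre
  unfold Spec_calculateD calculateD calculateD_alt
  by_cases h2 : (a.length : Int) = 2
  · simp only [h2]; norm_num
  by_cases h1 : (a.length : Int) = 1
  · simp only [h1]; norm_num
  by_cases h0 : (a.length : Int) = 0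
  · simp only [h0]; norm_num
  simp only [if_neg h2, if_neg h1, if_neg h0]
  have hn : 0 < (a.length : Int) := by omega
  have hN3 : 3 ≤ a.length := by omega
  -- the membership fact used on every loop index
  have hmem : ∀ i ∈ PySem.List.pyRange 0 (a.length : Int) 1, 0 ≤ i ∧ i < (a.length : Int) := by
    intro i hi
    exact (PySem.List.mem_pyRange_one.mp hi)
  -- A's inner fold from the port's literal initial state, for both directions
  have hinner : ∀ (d : Int), ∀ i ∈ PySem.List.pyRange 0 (a.length : Int) 1,
      ((PySem.List.pyRange 0 (a.length : Int) 1).foldl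
        (fun (st : Int × Int × Int) _j =>
          let temp := st.2.2 * pvAt a st.2.1 st.1
          let x := PySem.Int.mod (st.2.1 + d) (a.length : Int)
          let y := PySem.Int.mod (st.1 + 1) (a.length : Int)
          (y, x, temp)) (i, 0, 1)).2.2 = pvF a d i := by
    intro d i hi
    obtain ⟨hi0, hilt⟩ := hmem i hi
    have hinit1 : PySem.Int.mod (i + 0) (a.length : Int) = i := by
      rw [PySem.Int.mod_eq_emod_of_pos hn, add_zero]
      exact Int.emod_eq_of_lt hi0 hilt
    have hinit2 : PySem.Int.mod (d * 0) (a.length : Int) = 0 := by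
      rw [PySem.Int.mod_eq_emod_of_pos hn, mul_zero]
      exact Int.zero_emod _
    have := pvInnerA a d i hn a.length 0 1 (le_refl 0) (by omega)
    rw [hinit1, hinit2] at this
    exact this
  -- A's add pass
  have hadd : (PySem.List.pyRange 0 (a.length : Int) 1).foldl
      (fun add i =>
        let st := (PySem.List.pyRange 0 (a.length : Int) 1).foldl
          (fun (st : Int × Int × Int) _j =>
            let temp := st.2.2 * pvAt a st.2.1 st.1
            let x := PySem.Int.mod (st.2.1 + 1) (a.length : Int)
            let y := PySem.Int.mod (st.1 + 1) (a.length : Int)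
            (y, x, temp)) (i, 0, 1)
        add + st.2.2) 0
      = ((PySem.List.pyRange 0 (a.length : Int) 1).map (pvF a 1)).sum := by
    rw [PySem.List.foldl_congr_mem _ _ (fun acc i => acc + pvF a 1 i) 0
      (by intro acc i hi; simp only; rw [hinner 1 i hi])]
    rw [PySem.List.foldl_add]
    omega
  -- A's sub pass: the countdown range is the reverse of the count-up one
  have hrev : PySem.List.pyRange ((a.length : Int) - 1) (-1) (-1)
      = (PySem.List.pyRange 0 (a.length : Int) 1).reverse := by
    rw [PySem.List.pyRange_neg_one_eq_reverse]
    norm_num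
  have hsub : (PySem.List.pyRange ((a.length : Int) - 1) (-1) (-1)).foldl
      (fun sub i =>
        let st := (PySem.List.pyRange 0 (a.length : Int) 1).foldl
          (fun (st : Int × Int × Int) _j =>
            let temp := st.2.2 * pvAt a st.2.1 st.1
            let x := PySem.Int.mod (st.2.1 + -1) (a.length : Int)
            let y := PySem.Int.mod (st.1 + 1) (a.length : Int)
            (y, x, temp)) (i, 0, 1)
        sub - st.2.2) 0
      = -(((PySem.List.pyRange 0 (a.length : Int) 1).map (pvF a (-1))).sum) := by
    rw [hrev]
    rw [PySem.List.foldl_congr_mem _ _ (fun acc i => acc + -(pvF a (-1) i)) 0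
      (by
        intro acc i hi
        rw [List.mem_reverse] at hi
        simp only
        rw [hinner (-1) i hi]
        omega)]
    rw [PySem.List.foldl_add, List.map_reverse, List.sum_reverse, pvSumNeg]
    omega
  -- B's scan, run to the end
  rw [pvScanB a a.length (le_refl _), hadd, hsub]
  -- the two diagonal-product families coincide
  have hgf1 : (PySem.List.pyRange 0 (a.length : Int) 1).map (pvG a 1 a.length)
      = (PySem.List.pyRange 0 (a.length : Int) 1).map (pvF a 1) := by
    apply List.map_congr_left
    intro i _hi
    unfold pvG pvF
    apply PySem.List.foldl_congr_mem
    intro acc s hs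
    obtain ⟨hs0, hslt⟩ := hmem s hs
    simp [PySem.Int.mod_eq_emod_of_pos hn, Int.emod_eq_of_lt hs0 hslt]
  have hgf2 : (PySem.List.pyRange 0 (a.length : Int) 1).map (pvG a (-1) a.length)
      = (PySem.List.pyRange 0 (a.length : Int) 1).map (pvF a (-1)) := by
    apply List.map_congr_left
    intro i _hi
    unfold pvG pvF
    apply PySem.List.foldl_congr_mem
    intro acc s _hs
    norm_num
  rw [hgf1, hgf2]
  dsimp only
  congr 2
  omega
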